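-- pv_equiv track=rewrite | github.com/AlvaroFueyo/apscale_blast2 | src/apscale_blast2/filtering.py | choose_flag_rest
-- ===== SOURCE A (Python) =====
-- def choose_flag_rest(rows_dedup, ambiguous_species):
--     if len(rows_dedup)==1:
--         r=rows_dedup[0]; r["Flag"]=""; r["Ambiguous taxa"] = ""
--         return r
--     genera=set([r["Genus"] for r in rows_dedup if r["Genus"]])
--     species=sorted(set([r for r in ambiguous_species if r]))
--     if len(genera)==1:
--         if len(species)==2:
--             genus=list(genera)[0]; spec="/".join([s.replace(genus+" ","") for s in species])
--             r=rows_dedup[0].copy(); r["Species"]=f"{genus} {spec}"; r["Flag"]="F2 (Two species of one genus)"; r["Ambiguous taxa"]=", ".join(species); return r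
--         if len(species)>2:
--             r=rows_dedup[0].copy(); r["Species"]=f"{list(genera)[0]} sp."; r["Flag"]="F3 (Multiple species of one genus)"; r["Ambiguous taxa"]=", ".join(species); return r
--     levels = ["Species","Genus","Family","Order","Class","Phylum","Kingdom"]
--     tmp=[r.copy() for r in rows_dedup]
--     for lv in levels:
--         for r in tmp: r[lv]=""
--         seen=set(); ded=[]
--         for r in tmp:
--             key=(r["Kingdom"],r["Phylum"],r["Class"],r["Order"],r["Family"],r["Genus"],r["Species"])
--             if key not in seen: seen.add(key); ded.append(r)
--         tmp=ded
--         if len(tmp)==1: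
--             r=tmp[0]; r["Flag"]="F4 (Trimming to MRCA)"; r["Ambiguous taxa"]=", ".join(species); return r
--     r=tmp[0]; r["Flag"]="F4 (Trimming to MRCA)"; r["Ambiguous taxa"]=", ".join(species); return r
-- ===== SOURCE B (Python) =====
-- def choose_flag_rest(rows_dedup, ambiguous_species):
--     if len(rows_dedup) == 1:
--         r = rows_dedup[0]; r["Flag"] = ""; r["Ambiguous taxa"] = ""
--         return r
--     genera = set(r["Genus"] for r in rows_dedup if r["Genus"])
--     species = sorted(set(s for s in ambiguous_species if s))
--     r = rows_dedup[0].copy()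
--     if len(genera) == 1 and len(species) >= 2:
--         genus = next(iter(genera))
--         if len(species) == 2:
--             r["Species"] = genus + " " + "/".join(s.replace(genus + " ", "") for s in species)
--             r["Flag"] = "F2 (Two species of one genus)"
--         else:
--             r["Species"] = genus + " sp."
--             r["Flag"] = "F3 (Multiple species of one genus)"
--     else:
--         # convergence depth: smallest k such that blanking the k most specific
--         # levels makes every row agree on all seven taxonomy fields
--         levels = ["Species", "Genus", "Family", "Order", "Class", "Phylum", "Kingdom"]
--         keyfields = ["Kingdom", "Phylum", "Class", "Order", "Family", "Genus", "Species"]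
--         k = 1
--         while k < 7:
--             blank = set(levels[:k])
--             keys = set(tuple("" if f in blank else row[f] for f in keyfields) for row in rows_dedup)
--             if len(keys) == 1:
--                 break
--             k += 1
--         for lv in levels[:k]:
--             r[lv] = ""
--         r["Flag"] = "F4 (Trimming to MRCA)"
--     r["Ambiguous taxa"] = ", ".join(species)
--     return r
-- ===== Notes on version B (the rewrite author's own statement) =====
-- stated objective: simpler
-- what changed: The MRCA part no longer blanks and re-deduplicates a shrinking list of row copies level by level: B computes the convergence depth k (the smallest number of most-specific levels whose blanking makes all rows agree on the seven taxonomy fields) and then blanks rows_dedup[0].copy() once, sharing a single copy and a single trailing 'Ambiguous taxa' assignment across all multi-row branches.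
import Mathlib
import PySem

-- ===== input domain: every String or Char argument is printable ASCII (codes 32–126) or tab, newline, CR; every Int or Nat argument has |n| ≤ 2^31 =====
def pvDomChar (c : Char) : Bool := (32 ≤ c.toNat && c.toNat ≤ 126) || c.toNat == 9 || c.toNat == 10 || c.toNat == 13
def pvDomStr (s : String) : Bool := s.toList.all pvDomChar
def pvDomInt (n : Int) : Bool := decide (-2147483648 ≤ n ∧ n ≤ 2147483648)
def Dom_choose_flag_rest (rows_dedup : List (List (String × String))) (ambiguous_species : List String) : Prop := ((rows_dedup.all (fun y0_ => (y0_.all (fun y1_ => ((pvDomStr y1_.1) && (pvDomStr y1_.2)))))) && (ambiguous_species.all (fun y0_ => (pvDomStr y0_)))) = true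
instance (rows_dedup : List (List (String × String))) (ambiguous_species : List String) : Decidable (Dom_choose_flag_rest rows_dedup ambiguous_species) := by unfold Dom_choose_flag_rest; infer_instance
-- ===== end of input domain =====

-- B replaces A's per-level blank/re-dedup loop by a single convergence-depth computation followed by one
-- blanking pass (objective: simpler decomposition, same cost). Equivalence is about the RETURN value; in the
-- single-row branch both Pythons also mutate rows_dedup[0] in place identically.

-- shared literal constants (both Python sources contain these literals)
def pvLevels : List String := ["Species", "Genus", "Family", "Order", "Class", "Phylum", "Kingdom"]
def pvKeyfields : List String := ["Kingdom", "Phylum", "Class", "Order", "Family", "Genus", "Species"]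

-- ===== PORT A =====
-- r["Kingdom"] … ported as getD with default "": exact under Pre_ (every row carries the seven keys)
def pvKey7 (r : PySem.Dict String String) : List String :=
  pvKeyfields.map (fun f => r.getD f "")

-- the seen/ded dedup loop of A's MRCA part
def pvDedupGo (seen : PySem.Set (List String)) (ded : List (PySem.Dict String String)) :
    List (PySem.Dict String String) → List (PySem.Dict String String)
  | [] => ded
  | r :: rest =>
      let key := pvKey7 r
      if !PySem.Set.contains seen key then
        pvDedupGo (PySem.Set.add seen key) (ded ++ [r]) rest
      else
        pvDedupGo seen ded rest

def pvFinishA (sj : String) (r : PySem.Dict String String) : PySem.Dict String String :=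
  (r.insert "Flag" "F4 (Trimming to MRCA)").insert "Ambiguous taxa" sj

-- 'for lv in levels: …' of A's MRCA part, with the early return
def pvMrcaGo (sj : String) :
    List String → List (PySem.Dict String String) → PySem.Dict String String
  | [], tmp => pvFinishA sj (tmp.headD PySem.Dict.empty)
  | lv :: rest, tmp =>
      let tmp1 := tmp.map (fun r => r.insert lv "")
      let tmp2 := pvDedupGo PySem.Set.empty [] tmp1
      if tmp2.length = 1 then pvFinishA sj (tmp2.headD PySem.Dict.empty)
      else pvMrcaGo sj rest tmp2

def choose_flag_rest (rows_dedup : List (List (String × String))) (ambiguous_species : List String) : List (String × String) :=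
  if rows_dedup.length = 1 then
    (((PySem.Dict.mk (rows_dedup.headD [])).insert "Flag" "").insert "Ambiguous taxa" "").items
  else
    let dicts := rows_dedup.map PySem.Dict.mk
    let genera : PySem.Set String :=
      PySem.Set.ofList ((dicts.filter (fun r => r.getD "Genus" "" != "")).map (fun r => r.getD "Genus" ""))
    let species : List String :=
      PySem.List.sorted (PySem.Set.ofList (ambiguous_species.filter (fun s => s != ""))) (fun x => x) false
    if genera.length = 1 ∧ species.length = 2 then
      let genus := genera.headD ""
      let spec := PySem.Str.join "/" (species.map (fun s => PySem.Str.replace s (genus ++ " ") ""))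
      ((((PySem.Dict.mk (rows_dedup.headD [])).insert "Species" (genus ++ " " ++ spec)).insert
          "Flag" "F2 (Two species of one genus)").insert "Ambiguous taxa" (PySem.Str.join ", " species)).items
    else if genera.length = 1 ∧ 2 < species.length then
      ((((PySem.Dict.mk (rows_dedup.headD [])).insert "Species" (genera.headD "" ++ " sp.")).insert
          "Flag" "F3 (Multiple species of one genus)").insert "Ambiguous taxa" (PySem.Str.join ", " species)).items
    else
      (pvMrcaGo (PySem.Str.join ", " species) pvLevels dicts).items

-- ===== PORT B =====
def pvKeyBlank (blank : PySem.Set String) (r : PySem.Dict String String) : List String :=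
  pvKeyfields.map (fun f => if PySem.Set.contains blank f then "" else r.getD f "")

-- B's 'while k < 7' convergence-depth loop
def pvConvGo (dicts : List (PySem.Dict String String)) (k : Nat) : Nat :=
  if 7 ≤ k then k
  else if (PySem.Set.ofList (dicts.map (pvKeyBlank (PySem.Set.ofList (pvLevels.take k))))).length = 1 then k
  else pvConvGo dicts (k + 1)
termination_by 7 - k
decreasing_by omega

def choose_flag_rest_alt (rows_dedup : List (List (String × String))) (ambiguous_species : List String) : List (String × String) :=
  if rows_dedup.length = 1 then
    (((PySem.Dict.mk (rows_dedup.headD [])).insert "Flag" "").insert "Ambiguous taxa" "").items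
  else
    let dicts := rows_dedup.map PySem.Dict.mk
    let genera : PySem.Set String :=
      PySem.Set.ofList ((dicts.filter (fun r => r.getD "Genus" "" != "")).map (fun r => r.getD "Genus" ""))
    let species : List String :=
      PySem.List.sorted (PySem.Set.ofList (ambiguous_species.filter (fun s => s != ""))) (fun x => x) false
    let r0 := PySem.Dict.mk (rows_dedup.headD [])
    let r1 :=
      if genera.length = 1 ∧ 2 ≤ species.length then
        let genus := genera.headD ""
        if species.length = 2 then
          (r0.insert "Species"
              (genus ++ " " ++ PySem.Str.join "/" (species.map (fun s => PySem.Str.replace s (genus ++ " ") "")))).insert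
            "Flag" "F2 (Two species of one genus)"
        else
          (r0.insert "Species" (genus ++ " sp.")).insert "Flag" "F3 (Multiple species of one genus)"
      else
        let k := pvConvGo dicts 1
        (((pvLevels.take k).foldl (fun r lv => r.insert lv "") r0).insert "Flag" "F4 (Trimming to MRCA)")
    (r1.insert "Ambiguous taxa" (PySem.Str.join ", " species)).items

-- ===== PRECONDITION & SPEC =====
-- Pre_ excludes the empty list (A raises IndexError) and the multi-row inputs on which A raises KeyError:
-- a row without "Genus", or — unless the one-genus/two-species F2/F3 shortcut applies — a row missing one of
-- the seven taxonomy fields; it also excludes rows with duplicate keys, which do not represent a Python dict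
-- (dict(...) keeps the last value where a first-match association list keeps the first).
def Pre_choose_flag_rest (rows_dedup : List (List (String × String))) (ambiguous_species : List String) : Prop :=
  rows_dedup ≠ [] ∧
  (∀ row ∈ rows_dedup, (row.map Prod.fst).Nodup) ∧
  (rows_dedup.length = 1 ∨
    ((∀ row ∈ rows_dedup, "Genus" ∈ row.map Prod.fst) ∧
      (((PySem.Set.ofList ((rows_dedup.filterMap (fun row => List.lookup "Genus" row)).filter
            (fun g => g != ""))).length = 1 ∧
          2 ≤ (PySem.Set.ofList (ambiguous_species.filter (fun s => s != ""))).length) ∨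
        ∀ row ∈ rows_dedup, ∀ f ∈ pvKeyfields, f ∈ row.map Prod.fst)))
instance (rows_dedup : List (List (String × String))) (ambiguous_species : List String) : Decidable (Pre_choose_flag_rest rows_dedup ambiguous_species) := by unfold Pre_choose_flag_rest; infer_instance

def pvWitness_choose_flag_rest : (List (List (String × String))) × List String :=
  ([[("Kingdom", "K"), ("Phylum", "P"), ("Class", "C"), ("Order", "O"), ("Family", "F"), ("Genus", "Ga"), ("Species", "Ga x")],
    [("Kingdom", "K"), ("Phylum", "P"), ("Class", "C"), ("Order", "O"), ("Family", "F"), ("Genus", "Gb"), ("Species", "Gb y")]],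
   ["Ga x", "Gb y"])

def Spec_choose_flag_rest (rows_dedup : List (List (String × String))) (ambiguous_species : List String) (out : List (String × String)) : Prop := out = choose_flag_rest_alt rows_dedup ambiguous_species
instance (rows_dedup : List (List (String × String))) (ambiguous_species : List String) (out : List (String × String)) : Decidable (Spec_choose_flag_rest rows_dedup ambiguous_species out) := by unfold Spec_choose_flag_rest; infer_instance

-- ===== CLAIM (what is proved, stated in full; the proofs are below) =====
def Claim_equal_choose_flag_rest : Prop := ∀ (rows_dedup : List (List (String × String))) (ambiguous_species : List String), Dom_choose_flag_rest rows_dedup ambiguous_species → Pre_choose_flag_rest rows_dedup ambiguous_species → Spec_choose_flag_rest rows_dedup ambiguous_species (choose_flag_rest rows_dedup ambiguous_species)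

-- proof-only helpers
def pvKB (i : Nat) (r : PySem.Dict String String) : List String :=
  pvKeyfields.map (fun f => if f ∈ pvLevels.take i then "" else r.getD f "")

def pvBlankAt (lv : String) (ks : List String) : List String :=
  (pvKeyfields.zip ks).map (fun p => if p.1 = lv then "" else p.2)

def pvFoldB (dicts : List (PySem.Dict String String)) (i : Nat) : PySem.Dict String String :=
  (pvLevels.take i).foldl (fun r lv => r.insert lv "") (dicts.headD PySem.Dict.empty)

theorem pvBlankAt_map (lv : String) (v : String → String) :
    pvBlankAt lv (pvKeyfields.map v) = pvKeyfields.map (fun f => if f = lv then "" else v f) := rfl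

theorem pvKey7_insert (r : PySem.Dict String String) (lv : String) :
    pvKey7 (r.insert lv "") = pvBlankAt lv (pvKey7 r) := by
  simp only [pvKey7]
  rw [pvBlankAt_map]
  apply List.map_congr_left
  intro f _
  rw [PySem.Dict.getD_insert]

theorem pvKB_zero (r : PySem.Dict String String) : pvKB 0 r = pvKey7 r := by
  simp [pvKB, pvKey7]

set_option maxRecDepth 4096 in
theorem pvKB_succ (i : Nat) (hi : i < 7) (r : PySem.Dict String String) :
    pvKB (i + 1) r = pvBlankAt pvLevels[i] (pvKB i r) := by
  simp only [pvKB]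
  rw [pvBlankAt_map]
  apply List.map_congr_left
  intro f _
  have ht : pvLevels.take (i + 1) = pvLevels.take i ++ [pvLevels[i]] := by
    rw [List.take_add_one]
    simp [List.getElem?_eq_getElem (show i < pvLevels.length by simpa [pvLevels] using hi)]
  rw [ht]
  by_cases h1 : f = pvLevels[i]
  · rw [if_pos h1, if_pos (List.mem_append.2 (Or.inr (List.mem_singleton.2 h1)))]
  · rw [if_neg h1]
    by_cases h2 : f ∈ pvLevels.take i
    · rw [if_pos h2, if_pos (List.mem_append.2 (Or.inl h2))]
    · rw [if_neg h2, if_neg (fun hm => by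
        rcases List.mem_append.1 hm with h | h
        · exact h2 h
        · exact h1 (List.mem_singleton.1 h))]

theorem pvKeyBlank_eq (i : Nat) (r : PySem.Dict String String) :
    pvKeyBlank (PySem.Set.ofList (pvLevels.take i)) r = pvKB i r := by
  simp only [pvKeyBlank, pvKB]
  apply List.map_congr_left
  intro f _
  by_cases h : f ∈ pvLevels.take i
  · rw [if_pos ((PySem.Set.contains_iff _ _).2 ((PySem.Set.mem_ofList _ _).2 h)), if_pos h]
  · rw [if_neg (fun hc => h ((PySem.Set.mem_ofList _ _).1 ((PySem.Set.contains_iff _ _).1 hc))), if_neg h]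

theorem pvOfList_map {α β : Type} [BEq α] [LawfulBEq α] [BEq β] [LawfulBEq β]
    (l : List α) (f : α → β) :
    PySem.Set.ofList ((PySem.Set.ofList l).map f) = PySem.Set.ofList (l.map f) := by
  induction l using List.reverseRecOn with
  | nil => rfl
  | append_singleton l' x ih =>
      by_cases hx : x ∈ l'
      · rw [PySem.Set.ofList_append_singleton, PySem.Set.add_of_mem (by simpa [PySem.Set.mem_ofList] using hx),
          ih, List.map_append, List.map_singleton, PySem.Set.ofList_append_singleton,
          PySem.Set.add_of_mem (by simp [PySem.Set.mem_ofList]; exact ⟨x, hx, rfl⟩)]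
      · rw [PySem.Set.ofList_append_singleton, PySem.Set.add_of_not_mem (by simpa [PySem.Set.mem_ofList] using hx),
          List.map_append, List.map_singleton, PySem.Set.ofList_append_singleton, ih,
          List.map_append, List.map_singleton, PySem.Set.ofList_append_singleton]

theorem pvDedupGo_prefix (xs : List (PySem.Dict String String)) :
    ∀ seen ded, ∃ t, pvDedupGo seen ded xs = ded ++ t := by
  induction xs with
  | nil => intro seen ded; exact ⟨[], by simp [pvDedupGo]⟩
  | cons r rest ih =>
      intro seen ded
      by_cases hmem : pvKey7 r ∈ seen
      · obtain ⟨t, ht⟩ := ih seen ded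
        exact ⟨t, by simp [pvDedupGo, hmem, ht]⟩
      · obtain ⟨t, ht⟩ := ih (PySem.Set.add seen (pvKey7 r)) (ded ++ [r])
        exact ⟨[r] ++ t, by simp [pvDedupGo, hmem]; simpa [PySem.Set.add_of_not_mem hmem] using ht⟩

theorem pvDedupGo_head (x : PySem.Dict String String) (xs : List (PySem.Dict String String)) :
    (pvDedupGo PySem.Set.empty [] (x :: xs)).head? = some x := by
  obtain ⟨t, ht⟩ := pvDedupGo_prefix xs (PySem.Set.add PySem.Set.empty (pvKey7 x)) [x]
  have hmem : pvKey7 x ∉ (PySem.Set.empty : PySem.Set (List String)) := by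
    simp [PySem.Set.empty]
  rw [PySem.Set.add_of_not_mem hmem] at ht
  have hadd : PySem.Set.empty ++ [pvKey7 x] = [pvKey7 x] := rfl
  rw [hadd] at ht
  simp [pvDedupGo, ht]

theorem pvDedupGo_map (xs : List (PySem.Dict String String)) :
    ∀ seen ded, seen = ded.map pvKey7 →
      (pvDedupGo seen ded xs).map pvKey7 = PySem.Set.update seen (xs.map pvKey7) := by
  induction xs with
  | nil => intro seen ded h; simp [pvDedupGo, PySem.Set.update_nil]; exact h.symm
  | cons r rest ih =>
      intro seen ded h
      rw [List.map_cons, PySem.Set.update_cons]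
      by_cases hmem : pvKey7 r ∈ seen
      · rw [PySem.Set.add_of_mem hmem]
        have := ih seen ded h
        simp [pvDedupGo, hmem, this]
      · have hadd : PySem.Set.add seen (pvKey7 r) = seen ++ [pvKey7 r] := PySem.Set.add_of_not_mem hmem
        have hih := ih (PySem.Set.add seen (pvKey7 r)) (ded ++ [r]) (by rw [hadd, h]; simp)
        rw [hadd] at hih ⊢
        simpa [pvDedupGo, hmem] using hih

theorem pvDedupGo_map' (xs : List (PySem.Dict String String)) :
    (pvDedupGo PySem.Set.empty [] xs).map pvKey7 = PySem.Set.ofList (xs.map pvKey7) := by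
  rw [pvDedupGo_map xs PySem.Set.empty [] rfl,
    show (PySem.Set.empty : PySem.Set (List String)) = [] from rfl, PySem.Set.update_nil_left]
theorem pvHeadD_of_head? {α : Type} {l : List α} {x d : α} (h : l.head? = some x) :
    l.headD d = x := by
  cases l <;> simp_all

theorem pvFoldB_succ (dicts : List (PySem.Dict String String)) (i : Nat) (hi : i < 7) :
    pvFoldB dicts (i + 1) = (pvFoldB dicts i).insert pvLevels[i] "" := by
  unfold pvFoldB
  rw [List.take_add_one, List.getElem?_eq_getElem (show i < pvLevels.length by simpa [pvLevels] using hi),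
    Option.toList_some, List.foldl_append, List.foldl_cons, List.foldl_nil]
  rfl

theorem pvMrca_step (dicts : List (PySem.Dict String String)) (i : Nat) (hi : i < 7)
    (tmp : List (PySem.Dict String String))
    (h1 : tmp.head? = some (pvFoldB dicts i))
    (h2 : PySem.Set.ofList (tmp.map pvKey7) = PySem.Set.ofList (dicts.map (pvKB i))) :
    (pvDedupGo PySem.Set.empty [] (tmp.map (fun r => r.insert pvLevels[i] ""))).head? =
        some (pvFoldB dicts (i + 1)) ∧
      (pvDedupGo PySem.Set.empty [] (tmp.map (fun r => r.insert pvLevels[i] ""))).map pvKey7 =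
        PySem.Set.ofList (dicts.map (pvKB (i + 1))) := by
  constructor
  · cases tmp with
    | nil => simp at h1
    | cons a t =>
        have ha : a = pvFoldB dicts i := by simpa using h1
        rw [List.map_cons, pvDedupGo_head, ha, pvFoldB_succ dicts i hi]
  · rw [pvDedupGo_map']
    have hkeys : (tmp.map (fun r => r.insert pvLevels[i] "")).map pvKey7
        = (tmp.map pvKey7).map (pvBlankAt pvLevels[i]) := by
      simp only [List.map_map]
      apply List.map_congr_left
      intro r _
      exact pvKey7_insert r _
    have hkb : (dicts.map (pvKB i)).map (pvBlankAt pvLevels[i]) = dicts.map (pvKB (i + 1)) := by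
      simp only [List.map_map]
      apply List.map_congr_left
      intro d _
      exact (pvKB_succ i hi d).symm
    rw [hkeys, ← pvOfList_map, h2, pvOfList_map, hkb]

theorem pvTake8 : pvLevels.take 8 = pvLevels.take 7 := rfl

theorem pvConvGo_stop (dicts : List (PySem.Dict String String)) (k : Nat) (hk : 7 ≤ k) :
    pvConvGo dicts k = k := by
  rw [pvConvGo]
  simp [hk]

set_option maxHeartbeats 1000000 in
theorem pvMrca_main (dicts : List (PySem.Dict String String)) (sj : String) :
    ∀ n i tmp, i + n = 7 →
      tmp.head? = some (pvFoldB dicts i) →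
      PySem.Set.ofList (tmp.map pvKey7) = PySem.Set.ofList (dicts.map (pvKB i)) →
      pvMrcaGo sj (pvLevels.drop i) tmp =
        pvFinishA sj (pvFoldB dicts (pvConvGo dicts (i + 1))) := by
  intro n
  induction n with
  | zero =>
      intro i tmp hi h1 h2
      have hi7 : i = 7 := by omega
      subst hi7
      rw [show pvLevels.drop 7 = [] from rfl, pvMrcaGo, pvHeadD_of_head? h1,
        pvConvGo_stop dicts 8 (by omega)]
      show pvFinishA sj (pvFoldB dicts 7) = pvFinishA sj (pvFoldB dicts 8)
      unfold pvFoldB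
      rw [pvTake8]
  | succ n ih =>
      intro i tmp hi h1 h2
      have hi7 : i < 7 := by omega
      have hdrop : pvLevels.drop i = pvLevels[i] :: pvLevels.drop (i + 1) :=
        List.drop_eq_getElem_cons (by simp [pvLevels]; omega)
      obtain ⟨hh1, hh2⟩ := pvMrca_step dicts i hi7 tmp h1 h2
      have hlen2 : (pvDedupGo PySem.Set.empty []
          (tmp.map (fun r => r.insert pvLevels[i] ""))).length
          = (PySem.Set.ofList (dicts.map (pvKB (i + 1)))).length := by
        rw [← hh2, List.length_map]
      have hkeyeq : dicts.map (pvKeyBlank (PySem.Set.ofList (pvLevels.take (i + 1))))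
          = dicts.map (pvKB (i + 1)) := by
        apply List.map_congr_left
        intro d _
        exact pvKeyBlank_eq (i + 1) d
      rw [hdrop]
      simp only [pvMrcaGo]
      by_cases hlen : (pvDedupGo PySem.Set.empty []
          (tmp.map (fun r => r.insert pvLevels[i] ""))).length = 1
      · rw [if_pos hlen, pvHeadD_of_head? hh1]
        have hconv : pvConvGo dicts (i + 1) = i + 1 := by
          by_cases hi1 : 7 ≤ i + 1
          · exact pvConvGo_stop dicts (i + 1) hi1
          · rw [pvConvGo, if_neg hi1, hkeyeq, if_pos (by rw [← hlen2]; exact hlen)]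
        rw [hconv]
      · rw [if_neg hlen]
        have hh2' : PySem.Set.ofList ((pvDedupGo PySem.Set.empty []
            (tmp.map (fun r => r.insert pvLevels[i] ""))).map pvKey7)
            = PySem.Set.ofList (dicts.map (pvKB (i + 1))) := by
          rw [hh2, PySem.Set.ofList_ofList]
        have hrec := ih (i + 1) _ (by omega) hh1 hh2'
        rw [hrec]
        by_cases hi1 : 7 ≤ i + 1
        · rw [pvConvGo_stop dicts (i + 1) hi1, pvConvGo_stop dicts (i + 2) (by omega)]
          have h7 : i + 1 = 7 := by omega
          have h8 : i + 2 = 8 := by omega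
          rw [h7, h8]
          unfold pvFoldB
          rw [pvTake8]
        · have : pvConvGo dicts (i + 1) = pvConvGo dicts (i + 2) := by
            rw [pvConvGo]
            rw [if_neg hi1, hkeyeq, if_neg (by rw [← hlen2]; exact hlen)]
          rw [this]
theorem pvMrca_branch (dicts : List (PySem.Dict String String)) (hne : dicts ≠ []) (sj : String) :
    pvMrcaGo sj pvLevels dicts = pvFinishA sj (pvFoldB dicts (pvConvGo dicts 1)) := by
  have h1 : dicts.head? = some (pvFoldB dicts 0) := by
    cases dicts with
    | nil => exact absurd rfl hne
    | cons a t => simp [pvFoldB]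
  have h2 : PySem.Set.ofList (dicts.map pvKey7) = PySem.Set.ofList (dicts.map (pvKB 0)) := by
    have hmap : dicts.map (pvKB 0) = dicts.map pvKey7 :=
      List.map_congr_left (fun d _ => pvKB_zero d)
    rw [hmap]
  have hmain := pvMrca_main dicts sj 7 0 dicts (by omega) h1 h2
  simpa using hmain

theorem choose_flag_rest_spec : Claim_equal_choose_flag_rest := by
  intro rows ams _ hpre
  unfold Spec_choose_flag_rest choose_flag_rest choose_flag_rest_alt
  by_cases h1 : rows.length = 1
  · rw [if_pos h1, if_pos h1]
  · rw [if_neg h1, if_neg h1]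
    obtain ⟨hne, -, -⟩ := hpre
    have hne' : rows.map PySem.Dict.mk ≠ [] := by simpa using hne
    dsimp only
    set G : PySem.Set String := PySem.Set.ofList
      (((rows.map PySem.Dict.mk).filter (fun r => r.getD "Genus" "" != "")).map
        (fun r => r.getD "Genus" "")) with hG
    set S : List String := PySem.List.sorted
      (PySem.Set.ofList (ams.filter (fun s => s != ""))) (fun x => x) false with hS
    have hmrca : (pvMrcaGo (PySem.Str.join ", " S) pvLevels (rows.map PySem.Dict.mk)).items
        = ((((pvLevels.take (pvConvGo (rows.map PySem.Dict.mk) 1)).foldl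
              (fun r lv => r.insert lv "") (PySem.Dict.mk (rows.headD []))).insert
            "Flag" "F4 (Trimming to MRCA)").insert
            "Ambiguous taxa" (PySem.Str.join ", " S)).items := by
      rw [pvMrca_branch _ hne' _]
      have hhd : (rows.map PySem.Dict.mk).headD PySem.Dict.empty
          = PySem.Dict.mk (rows.headD []) := by
        cases rows with
        | nil => exact absurd rfl hne
        | cons a t => rfl
      rw [pvFinishA, pvFoldB, hhd]
    by_cases hg : G.length = 1
    · by_cases hs2 : S.length = 2
      · rw [if_pos ⟨hg, hs2⟩, if_pos ⟨hg, by omega⟩, if_pos hs2]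
      · by_cases hs3 : 2 < S.length
        · rw [if_neg (fun h => hs2 h.2), if_pos ⟨hg, hs3⟩, if_pos ⟨hg, by omega⟩, if_neg hs2]
        · rw [if_neg (fun h => hs2 h.2), if_neg (fun h => hs3 h.2),
            if_neg (fun h => absurd h.2 (by omega))]
          exact hmrca
    · rw [if_neg (fun h => hg h.1), if_neg (fun h => hg h.1), if_neg (fun h => hg h.1)]
      exact hmrca
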